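-- pv_equiv track=rewrite | github.com/Octopus67/Repwise | scripts/import_wger.py | determine_equipment
-- ===== SOURCE A (Python) =====
-- WGER_EQUIPMENT_TO_TYPE: dict[int, str] = {
--     1: "barbell",
--     2: "barbell",       # SZ-bar / EZ-bar
--     3: "dumbbell",
--     4: "bodyweight",    # gym mat
--     5: "bodyweight",    # swiss ball
--     6: "bodyweight",    # pull-up bar
--     7: "bodyweight",    # none / bodyweight
--     8: "bodyweight",    # bench (accessory, not primary equipment)
--     9: "bodyweight",    # incline bench
--     10: "kettlebell",
-- }
--
-- def determine_equipment(equipment_ids: list[int]) -> str: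
--     """Determine equipment type from wger equipment IDs.
--
--     If multiple equipment items, pick the most specific one (prefer
--     barbell/dumbbell/kettlebell over bodyweight).
--     """
--     if not equipment_ids:
--         return "bodyweight"
--
--     mapped = []
--     for eid in equipment_ids:
--         eq = WGER_EQUIPMENT_TO_TYPE.get(eid, "bodyweight")
--         mapped.append(eq)
--
--     # Prefer specific equipment over bodyweight
--     priority = ["barbell", "dumbbell", "kettlebell", "cable", "machine",
--                  "smith_machine", "band", "bodyweight"]
--     for p in priority:
--         if p in mapped:
--             return p
--
--     return mapped[0] if mapped else "bodyweight"
-- ===== SOURCE B (Python) =====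
-- WGER_EQUIPMENT_TO_TYPE: dict[int, str] = {
--     1: "barbell",
--     2: "barbell",
--     3: "dumbbell",
--     4: "bodyweight",
--     5: "bodyweight",
--     6: "bodyweight",
--     7: "bodyweight",
--     8: "bodyweight",
--     9: "bodyweight",
--     10: "kettlebell",
-- }
--
--
-- def determine_equipment(equipment_ids: list[int]) -> str:
--     """Determine equipment type from wger equipment IDs (rank-minimum version)."""
--     if not equipment_ids:
--         return "bodyweight"
--     priority = ["barbell", "dumbbell", "kettlebell", "cable", "machine",
--                 "smith_machine", "band", "bodyweight"]
--     rank = {p: i for i, p in enumerate(priority)}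
--     types = [WGER_EQUIPMENT_TO_TYPE.get(eid, "bodyweight") for eid in equipment_ids]
--     return min(types, key=lambda t: rank[t])
-- ===== Notes on version B (the rewrite author's own statement) =====
-- stated objective: alternative
-- what changed: Replaced A's outer scan over the 8-entry priority list with membership tests into the mapped list by building a type->rank dict once and taking the mapped type of minimum rank in a single min pass.
import Mathlib
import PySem

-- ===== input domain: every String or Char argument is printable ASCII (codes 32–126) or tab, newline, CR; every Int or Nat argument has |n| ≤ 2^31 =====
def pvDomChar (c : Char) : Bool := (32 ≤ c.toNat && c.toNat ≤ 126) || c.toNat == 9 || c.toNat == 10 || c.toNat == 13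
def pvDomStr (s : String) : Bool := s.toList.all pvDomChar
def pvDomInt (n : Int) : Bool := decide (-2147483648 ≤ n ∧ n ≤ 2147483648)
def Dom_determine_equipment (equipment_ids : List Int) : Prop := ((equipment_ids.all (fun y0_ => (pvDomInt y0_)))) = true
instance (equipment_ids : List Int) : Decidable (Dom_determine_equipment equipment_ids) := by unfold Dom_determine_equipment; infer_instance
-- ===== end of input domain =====

-- B replaces A's scan over the priority list (with a membership test into the mapped
-- list at each step) by a single min-by-rank pass over the mapped types.

-- ===== PORT A =====

-- module-level constant WGER_EQUIPMENT_TO_TYPE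
def wgerEquipmentToType : PySem.Dict Int String :=
  PySem.Dict.ofList
    [(1, "barbell"), (2, "barbell"), (3, "dumbbell"), (4, "bodyweight"),
     (5, "bodyweight"), (6, "bodyweight"), (7, "bodyweight"), (8, "bodyweight"),
     (9, "bodyweight"), (10, "kettlebell")]

-- A's loop 'for p in priority: if p in mapped: return p'
def scanPriority : List String → List String → Option String
  | [], _ => none
  | p :: ps, mapped => if mapped.contains p then some p else scanPriority ps mapped

def determine_equipment (equipment_ids : List Int) : String :=
  if equipment_ids = [] then "bodyweight"
  else
    -- mapped = []; for eid in equipment_ids: mapped.append(WGER_....get(eid, "bodyweight"))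
    let mapped := equipment_ids.foldl
      (fun acc eid => acc ++ [wgerEquipmentToType.getD eid "bodyweight"]) []
    let priority := ["barbell", "dumbbell", "kettlebell", "cable", "machine",
                     "smith_machine", "band", "bodyweight"]
    match scanPriority priority mapped with
    | some p => p
    | none => match mapped with       -- 'mapped[0] if mapped else "bodyweight"'
              | [] => "bodyweight"
              | x :: _ => x

-- ===== PORT B =====

def determine_equipment_alt (equipment_ids : List Int) : String :=
  if equipment_ids = [] then "bodyweight"
  else
    let priority := ["barbell", "dumbbell", "kettlebell", "cable", "machine",
                     "smith_machine", "band", "bodyweight"]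
    -- rank = {p: i for i, p in enumerate(priority)}
    let rank : PySem.Dict String Int :=
      (PySem.List.enumerate priority 0).foldl
        (fun d ip => d.insert ip.2 ip.1) PySem.Dict.empty
    let types := equipment_ids.map
      (fun eid => wgerEquipmentToType.getD eid "bodyweight")
    -- min(types, key=lambda t: rank[t]); every mapped type is a key of rank so the
    -- get? default is unreachable, and types is nonempty so minD's default is too
    PySem.List.minD types (fun t => (rank.get? t).getD 0) "bodyweight"

-- ===== PRECONDITION & SPEC =====
def Spec_determine_equipment (equipment_ids : List Int) (out : String) : Prop := out = determine_equipment_alt equipment_ids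
instance (equipment_ids : List Int) (out : String) : Decidable (Spec_determine_equipment equipment_ids out) := by unfold Spec_determine_equipment; infer_instance

-- ===== CLAIM (what is proved, stated in full; the proofs are below) =====
def Claim_equal_determine_equipment : Prop := ∀ (equipment_ids : List Int), Dom_determine_equipment equipment_ids → Spec_determine_equipment equipment_ids (determine_equipment equipment_ids)

-- ===== LEMMAS AND PROOFS =====

-- every value the wger lookup can produce is one of the four types that actually occur
def isMappedType (s : String) : Prop :=
  s = "barbell" ∨ s = "dumbbell" ∨ s = "kettlebell" ∨ s = "bodyweight"

theorem wger_mapped_type (e : Int) :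
    isMappedType (wgerEquipmentToType.getD e "bodyweight") := by
  simp [wgerEquipmentToType, PySem.Dict.ofList, PySem.Dict.getD, isMappedType,
    PySem.Dict.update, PySem.Dict.insert, PySem.Dict.empty, PySem.Dict.get?,
    List.foldl, List.find?_cons]
  repeat' split
  all_goals simp

-- the least-rank type among a :: L, when every element is one of the four mapped types
def chain (a : String) (L : List String) : String :=
  if a = "barbell" ∨ "barbell" ∈ L then "barbell"
  else if a = "dumbbell" ∨ "dumbbell" ∈ L then "dumbbell"
  else if a = "kettlebell" ∨ "kettlebell" ∈ L then "kettlebell"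
  else "bodyweight"

-- B's running-minimum fold computes `chain`
theorem fold_char (K : String → Int)
    (hK : K "barbell" = 0 ∧ K "dumbbell" = 1 ∧ K "kettlebell" = 2 ∧ K "bodyweight" = 7)
    (L : List String) (a : String) (ha : isMappedType a)
    (hL : ∀ x ∈ L, isMappedType x) :
    L.foldl
      (fun acc x =>
        match acc with
        | none => some x
        | some m => if K x < K m then some x else some m)
      (some a) = some (chain a L) := by
  obtain ⟨k0, k1, k2, k7⟩ := hK
  induction L generalizing a with
  | nil =>
    rcases ha with h|h|h|h <;> subst h <;> simp [chain]
  | cons x t ih =>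
    have hx : isMappedType x := hL x (by simp)
    have ht : ∀ y ∈ t, isMappedType y := fun y hy => hL y (by simp [hy])
    simp only [List.foldl_cons]
    rcases ha with h|h|h|h <;> rcases hx with h'|h'|h'|h' <;> subst h h' <;>
      simp only [k0, k1, k2, k7] <;> norm_num <;>
      rw [ih _ (by simp [isMappedType]) ht] <;>
      simp [chain]


-- packaging of fold_char at PySem.List.min?
theorem min?_char (K : String → Int)
    (hK : K "barbell" = 0 ∧ K "dumbbell" = 1 ∧ K "kettlebell" = 2 ∧ K "bodyweight" = 7)
    (L : List String) (a : String) (ha : isMappedType a)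
    (hL : ∀ x ∈ L, isMappedType x) :
    PySem.List.min? (a :: L) K = some (chain a L) := by
  have h := fold_char K hK L a ha hL
  simp only [PySem.List.min?, List.foldl_cons]
  convert h using 2
  funext acc x
  cases acc <;> rfl

-- A's priority scan also computes `chain` (the cons's head serves as the unreachable fallback)
theorem scan_eq_chain (fa : String) (L : List String) (h0 : isMappedType fa)
    (hL : ∀ x ∈ L, isMappedType x) :
    (match scanPriority ["barbell", "dumbbell", "kettlebell", "cable", "machine",
                         "smith_machine", "band", "bodyweight"] (fa :: L) with
     | some p => p
     | none => fa) = chain fa L := by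
  have hT : ∀ x ∈ fa :: L, isMappedType x := by
    intro x hx
    rcases List.mem_cons.1 hx with h | h
    · exact h ▸ h0
    · exact hL x h
  have hnc : ("cable" : String) ∉ fa :: L := fun h => by
    simpa [isMappedType] using hT _ h
  have hnm : ("machine" : String) ∉ fa :: L := fun h => by
    simpa [isMappedType] using hT _ h
  have hns : ("smith_machine" : String) ∉ fa :: L := fun h => by
    simpa [isMappedType] using hT _ h
  have hnb : ("band" : String) ∉ fa :: L := fun h => by
    simpa [isMappedType] using hT _ h
  by_cases h1 : ("barbell" : String) ∈ fa :: L <;>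
    by_cases h2 : ("dumbbell" : String) ∈ fa :: L <;>
      by_cases h3 : ("kettlebell" : String) ∈ fa :: L <;>
        by_cases h4 : ("bodyweight" : String) ∈ fa :: L <;>
          simp only [scanPriority, List.contains_eq_mem, h1, h2, h3, h4, hnc, hnm, hns, hnb,
            chain, decide_true, decide_false, if_true] <;>
          simp_all [List.mem_cons, isMappedType, eq_comm]

-- ===== VERDICT (by name: the statement is the Claim_ definition above) =====
theorem determine_equipment_spec : Claim_equal_determine_equipment := by
  intro ids _
  unfold Spec_determine_equipment
  cases ids with
  | nil => rfl
  | cons a t =>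
    unfold determine_equipment determine_equipment_alt
    rw [if_neg (List.cons_ne_nil a t), if_neg (List.cons_ne_nil a t)]
    simp only []
    have hmap := PySem.List.foldl_append_singleton_eq_map
      (fun eid => wgerEquipmentToType.getD eid "bodyweight") (a :: t) []
    rw [List.nil_append] at hmap
    rw [hmap]
    simp only [List.map_cons, PySem.List.minD]
    rw [min?_char
        (fun u => (((PySem.List.enumerate ["barbell", "dumbbell", "kettlebell", "cable",
              "machine", "smith_machine", "band", "bodyweight"] 0).foldl
            (fun d ip => d.insert ip.2 ip.1)
            (PySem.Dict.empty (κ := String) (ν := Int))).get? u).getD 0)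
        (by refine ⟨?_, ?_, ?_, ?_⟩ <;> decide) _ _ (wger_mapped_type a)
        (by intro x hx; obtain ⟨e, _, rfl⟩ := List.mem_map.1 hx; exact wger_mapped_type e)]
    simp only [Option.getD_some]
    exact scan_eq_chain _ _ (wger_mapped_type a)
      (by intro x hx; obtain ⟨e, _, rfl⟩ := List.mem_map.1 hx; exact wger_mapped_type e)
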